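-- pv_equiv track=rewrite | github.com/RamiroSGaspar/UCASAL_Ciencia-de-Datos | 1er_Año/Programación_2_2ndoSemestre/TP4_Programación2_UCASAL/TP4_Ejercicio_08.py | datos_especificos
-- ===== SOURCE A (Python) =====
-- def datos_especificos(datos, años_especificos):
--     años_filtrados = []
--     poblacion_filtrada = []
--
--     for años, poblacion in datos:
--         if años in años_especificos:
--             años_filtrados.append(años)
--             poblacion_filtrada.append(poblacion)
--
--     return años_filtrados, poblacion_filtrada
-- ===== SOURCE B (Python) =====
-- def datos_especificos(datos, años_especificos):
--     # index pass: map each year to the (increasing) list of its positions in datos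
--     pos = {}
--     for i, (año, _) in enumerate(datos):
--         pos.setdefault(año, []).append(i)
--     # gather pass: membership is tested once per DISTINCT year, not once per row
--     indices = []
--     for año, lugares in pos.items():
--         if año in años_especificos:
--             indices.extend(lugares)
--     indices.sort()
--     # read the two columns off by position
--     return [datos[i][0] for i in indices], [datos[i][1] for i in indices]
-- ===== Notes on version B (the rewrite author's own statement) =====
-- stated objective: alternative
-- what changed: B replaces A's single filtering loop by a position-index algorithm: one pass groups each year's positions in a dict, the requested years' position lists are gathered with one membership test per distinct year, sorted, and the two columns are read off by position.
import Mathlib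
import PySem

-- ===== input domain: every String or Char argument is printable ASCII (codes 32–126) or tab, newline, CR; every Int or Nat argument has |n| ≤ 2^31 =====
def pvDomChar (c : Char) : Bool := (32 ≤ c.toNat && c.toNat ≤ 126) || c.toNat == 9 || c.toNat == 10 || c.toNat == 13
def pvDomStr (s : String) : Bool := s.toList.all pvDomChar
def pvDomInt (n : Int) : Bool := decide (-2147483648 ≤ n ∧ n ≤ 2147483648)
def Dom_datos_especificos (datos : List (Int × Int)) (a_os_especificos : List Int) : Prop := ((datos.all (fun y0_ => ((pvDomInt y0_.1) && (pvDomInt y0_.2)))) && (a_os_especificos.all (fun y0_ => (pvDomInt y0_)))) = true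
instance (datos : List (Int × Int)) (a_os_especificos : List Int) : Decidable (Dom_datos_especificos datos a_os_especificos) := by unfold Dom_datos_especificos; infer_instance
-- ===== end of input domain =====

-- B replaces A's single filtering loop by a position index: one pass groups the
-- positions of each year in a dict, the requested years' position lists are
-- gathered (one membership test per DISTINCT year) and sorted, and the two
-- output columns are read off by position (alternative algorithm, same result).

-- ===== PORT A =====
-- one loop over datos, appending each matching year/population to two parallel accumulator lists
def datos_especificos (datos : List (Int × Int)) (a_os_especificos : List Int) : List Int × List Int :=
  datos.foldl
    (fun acc p =>
      if p.1 ∈ a_os_especificos then (acc.1 ++ [p.1], acc.2 ++ [p.2]) else acc)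
    ([], [])

-- ===== PORT B =====
-- index pass (dict year → positions), gather pass over the dict's items, sort, then two indexed reads
def datos_especificos_alt (datos : List (Int × Int)) (a_os_especificos : List Int) : List Int × List Int :=
  -- pos = {}; for i, (año, _) in enumerate(datos): pos.setdefault(año, []).append(i)
  let pos : PySem.Dict Int (List Int) :=
    ((PySem.List.enumerate datos).map (fun q => (q.2.1, q.1))).foldl
      (fun d p => d.modify p.1 [] (· ++ [p.2])) PySem.Dict.empty
  -- indices = []; for año, lugares in pos.items(): if año in años_especificos: indices.extend(lugares)
  let gathered : List Int :=
    pos.items.foldl (fun acc kv => if kv.1 ∈ a_os_especificos then acc ++ kv.2 else acc) []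
  -- indices.sort()
  let indices := PySem.List.sorted gathered (fun x => x) false
  -- [datos[i][0] for i in indices], [datos[i][1] for i in indices]  (every i is a valid position by construction)
  (indices.map (fun i => (PySem.List.pyGetD datos i ((0 : Int), (0 : Int))).1),
   indices.map (fun i => (PySem.List.pyGetD datos i ((0 : Int), (0 : Int))).2))

-- ===== PRECONDITION & SPEC =====
def Spec_datos_especificos (datos : List (Int × Int)) (a_os_especificos : List Int) (out : List Int × List Int) : Prop := out = datos_especificos_alt datos a_os_especificos
instance (datos : List (Int × Int)) (a_os_especificos : List Int) (out : List Int × List Int) : Decidable (Spec_datos_especificos datos a_os_especificos out) := by unfold Spec_datos_especificos; infer_instance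

-- ===== CLAIM (what is proved, stated in full; the proofs are below) =====
def Claim_equal_datos_especificos : Prop := ∀ (datos : List (Int × Int)) (a_os_especificos : List Int), Dom_datos_especificos datos a_os_especificos → Spec_datos_especificos datos a_os_especificos (datos_especificos datos a_os_especificos)

-- ===== LEMMAS AND PROOFS =====

-- the (year, position) pairs of datos, in order
def pvPairs (datos : List (Int × Int)) : List (Int × Int) :=
  (PySem.List.enumerate datos).map (fun q => (q.2.1, q.1))
def pvMIdx (datos : List (Int × Int)) (a_os : List Int) : List Int :=
  ((PySem.List.enumerate datos).filter (fun q => decide (q.2.1 ∈ a_os))).map (·.1)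

theorem pvPairs_snd_nodup (datos : List (Int × Int)) : ((pvPairs datos).map (·.2)).Nodup := by
  unfold pvPairs
  rw [List.map_map]
  have h := PySem.List.pairwise_lt_enumerate datos (0:Int)
  have : (List.map ((fun q : Int × Int => q.2) ∘ fun q : Int × (Int × Int) => (q.2.1, q.1)) (PySem.List.enumerate datos)).Pairwise (· < ·) := by
    rw [List.pairwise_map]
    exact h.imp (fun hpq => hpq)
  exact this.imp (fun h => ne_of_lt h)

theorem pvMIdx_pairwise (datos : List (Int × Int)) (a_os : List Int) :
    (pvMIdx datos a_os).Pairwise (· < ·) := by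
  unfold pvMIdx
  rw [List.pairwise_map]
  exact (PySem.List.pairwise_lt_enumerate datos 0).sublist List.filter_sublist

theorem pvA_foldl (datos : List (Int × Int)) (a_os : List Int) :
    (datos.foldl (fun acc p => if p.1 ∈ a_os then (acc.1 ++ [p.1], acc.2 ++ [p.2]) else acc) ([], []))
      = ((datos.filter (fun x => decide (x.1 ∈ a_os))).map (·.1),
         (datos.filter (fun x => decide (x.1 ∈ a_os))).map (·.2)) := by
  have h : datos.foldl (fun acc p => if p.1 ∈ a_os then (acc.1 ++ [p.1], acc.2 ++ [p.2]) else acc) (([],[]) : List Int × List Int)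
      = datos.foldl (fun acc p => (if p.1 ∈ a_os then acc.1 ++ [p.1] else acc.1, if p.1 ∈ a_os then acc.2 ++ [p.2] else acc.2)) ([],[]) := by
    apply PySem.List.foldl_congr_mem
    intro acc x _
    split_ifs <;> rfl
  rw [h, PySem.List.foldl_prod_mk (f := fun a (p : Int × Int) => if p.1 ∈ a_os then a ++ [p.1] else a) (g := fun a (p : Int × Int) => if p.1 ∈ a_os then a ++ [p.2] else a)]
  rw [PySem.List.foldl_append_ite (p := fun x : Int × Int => x.1 ∈ a_os) (f := fun x => x.1),
      PySem.List.foldl_append_ite (p := fun x : Int × Int => x.1 ∈ a_os) (f := fun x => x.2)]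
  simp

-- step 1: dict values
theorem pvGetD (datos : List (Int × Int)) (a : Int) :
    (((pvPairs datos).foldl (fun d p => d.modify p.1 [] (· ++ [p.2])) PySem.Dict.empty).getD a [])
      = ((pvPairs datos).filter (fun p => p.1 == a)).map (·.2) := by
  rw [PySem.Dict.getD_foldl_modify_append]
  simp [PySem.Dict.getD_empty]

theorem pvKeys (datos : List (Int × Int)) :
    ((pvPairs datos).foldl (fun d p => d.modify p.1 [] (· ++ [p.2])) PySem.Dict.empty).keys
      = PySem.Set.ofList ((pvPairs datos).map (·.1)) := by
  rw [PySem.Dict.keys_foldl_modify_key (l := pvPairs datos) (key := fun p : Int × Int => p.1) (d0 := ([] : List Int)) (f := fun d p => (fun x => x ++ [p.2])) (d := PySem.Dict.empty)]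
  simp only [PySem.Dict.keys_empty]
  exact PySem.Set.update_nil_left _

theorem pvKeysNodup (datos : List (Int × Int)) :
    ((pvPairs datos).foldl (fun d p => d.modify p.1 [] (· ++ [p.2])) PySem.Dict.empty).keys.Nodup := by
  exact PySem.Dict.nodup_keys_foldl_modify_key _ _ _ _ _ PySem.Dict.nodup_keys_empty

def pvGatherSpec (datos : List (Int × Int)) (a_os : List Int) : List Int :=
  ((PySem.Set.ofList ((pvPairs datos).map (·.1))).filter (fun a => decide (a ∈ a_os))).flatMap
    (fun a => ((pvPairs datos).filter (fun p => p.1 == a)).map (·.2))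

theorem pvGather (datos : List (Int × Int)) (a_os : List Int) :
    (((pvPairs datos).foldl (fun d p => d.modify p.1 [] (· ++ [p.2])) PySem.Dict.empty).items.foldl
        (fun acc kv => if kv.1 ∈ a_os then acc ++ kv.2 else acc) [])
      = pvGatherSpec datos a_os := by
  rw [PySem.List.foldl_ite_eq_foldl_filter, PySem.List.foldl_append_eq_flatMap (g := fun kv : Int × List Int => kv.2)]
  rw [PySem.Dict.items_eq_map_keys _ (pvKeysNodup datos) ([] : List Int)]
  rw [List.filter_map, List.flatMap_map]
  rw [pvKeys]
  unfold pvGatherSpec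
  simp only [List.nil_append, Function.comp_def, pvGetD]

theorem pvMem_gather (datos : List (Int × Int)) (a_os : List Int) (i : Int) :
    i ∈ pvGatherSpec datos a_os ↔ i ∈ pvMIdx datos a_os := by
  unfold pvGatherSpec pvMIdx pvPairs
  simp only [List.mem_flatMap, List.mem_filter, List.mem_map, PySem.Set.mem_ofList]
  constructor
  · rintro ⟨a, ⟨-, ha⟩, ⟨p, ⟨⟨q, hq, rfl⟩, hpa⟩, rfl⟩⟩
    refine ⟨q, ⟨hq, ?_⟩, rfl⟩
    simp at hpa ha ⊢
    rwa [hpa]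
  · rintro ⟨q, ⟨hq, hmem⟩, rfl⟩
    refine ⟨q.2.1, ⟨⟨(q.2.1, q.1), ⟨q, hq, rfl⟩, rfl⟩, by simpa using hmem⟩,
      ⟨(q.2.1, q.1), ⟨⟨q, hq, rfl⟩, by simp⟩, rfl⟩⟩

theorem pvGather_nodup (datos : List (Int × Int)) (a_os : List Int) :
    (pvGatherSpec datos a_os).Nodup := by
  unfold pvGatherSpec
  rw [List.nodup_flatMap]
  constructor
  · intro a _
    exact (pvPairs_snd_nodup datos).sublist (List.Sublist.map _ List.filter_sublist)
  · have hkeys : ((PySem.Set.ofList ((pvPairs datos).map (·.1))).filter (fun a => decide (a ∈ a_os))).Nodup :=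
      (PySem.Set.nodup_ofList _).filter _
    refine hkeys.imp ?_
    intro a a' hne
    rw [Function.onFun, List.disjoint_left]
    intro i h1 h2
    rw [List.mem_map] at h1 h2
    obtain ⟨p, hp, rfl⟩ := h1
    obtain ⟨p', hp', hsnd⟩ := h2
    have hp1 := List.of_mem_filter hp
    have hp'1 := List.of_mem_filter hp'
    have := List.inj_on_of_nodup_map (pvPairs_snd_nodup datos) (List.mem_of_mem_filter hp) (List.mem_of_mem_filter hp') hsnd.symm
    apply hne
    have e1 : p.1 = a := by simpa using hp1
    have e2 : p'.1 = a' := by simpa using hp'1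
    rw [← e1, ← e2, this]

theorem pvMIdx_nodup (datos : List (Int × Int)) (a_os : List Int) : (pvMIdx datos a_os).Nodup :=
  (pvMIdx_pairwise datos a_os).imp (fun h => ne_of_lt h)

theorem pvSorted_eq (datos : List (Int × Int)) (a_os : List Int) :
    PySem.List.sorted (pvGatherSpec datos a_os) (fun x => x) false = pvMIdx datos a_os := by
  apply PySem.List.sorted_eq_of_perm_of_pairwise_lt
  · exact ((List.perm_ext_iff_of_nodup (pvGather_nodup datos a_os) (pvMIdx_nodup datos a_os)).mpr
      (pvMem_gather datos a_os)).symm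
  · exact pvMIdx_pairwise datos a_os

theorem pvEnum_filter_map_snd (p : (Int × Int) → Bool) (datos : List (Int × Int)) (s : Int) :
    ((PySem.List.enumerate datos s).filter (fun q => p q.2)).map (·.2) = datos.filter p := by
  induction datos generalizing s with
  | nil => rfl
  | cons x xs ih =>
    rw [PySem.List.enumerate_cons]
    by_cases h : p x <;> simp [h, ih]

theorem pvRead_col (datos : List (Int × Int)) (a_os : List Int) (f : Int × Int → Int) :
    (pvMIdx datos a_os).map (fun i => f (PySem.List.pyGetD datos i ((0 : Int), (0 : Int))))
      = (datos.filter (fun x => decide (x.1 ∈ a_os))).map f := by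
  unfold pvMIdx
  rw [List.map_map]
  have h : ∀ q ∈ (PySem.List.enumerate datos (0:Int)).filter (fun q => decide (q.2.1 ∈ a_os)),
      ((fun i => f (PySem.List.pyGetD datos i ((0:Int),(0:Int)))) ∘ (·.1)) q = f q.2 := by
    intro q hq
    have hq' := List.mem_of_mem_filter hq
    rw [PySem.List.mem_enumerate_iff] at hq'
    obtain ⟨k, hk, rfl⟩ := hq'
    simp [PySem.List.pyGetD_natCast, hk]
  rw [List.map_congr_left h]
  have : (fun q : Int × (Int × Int) => f q.2) = f ∘ (fun q : Int × (Int × Int) => q.2) := rfl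
  rw [this, ← List.map_map, pvEnum_filter_map_snd (fun x : Int × Int => decide (x.1 ∈ a_os)) datos 0]


-- B's gather loop over the dict's items, stated on the port's own expression
theorem pvGather_port (datos : List (Int × Int)) (a_os : List Int) :
    ((((PySem.List.enumerate datos).map (fun q => (q.2.1, q.1))).foldl
          (fun d p => d.modify p.1 [] (· ++ [p.2])) PySem.Dict.empty).items.foldl
        (fun acc kv => if kv.1 ∈ a_os then acc ++ kv.2 else acc) [])
      = pvGatherSpec datos a_os :=
  pvGather datos a_os

theorem pvRead_fst (datos : List (Int × Int)) (a_os : List Int) :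
    (pvMIdx datos a_os).map (fun i => (PySem.List.pyGetD datos i ((0 : Int), (0 : Int))).1)
      = (datos.filter (fun x => decide (x.1 ∈ a_os))).map (·.1) :=
  pvRead_col datos a_os (fun x => x.1)

theorem pvRead_snd (datos : List (Int × Int)) (a_os : List Int) :
    (pvMIdx datos a_os).map (fun i => (PySem.List.pyGetD datos i ((0 : Int), (0 : Int))).2)
      = (datos.filter (fun x => decide (x.1 ∈ a_os))).map (·.2) :=
  pvRead_col datos a_os (fun x => x.2)

-- A's loop computes the two columns of the filtered list
theorem pvA_eq (datos : List (Int × Int)) (a_os : List Int) :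
    datos_especificos datos a_os
      = ((datos.filter (fun x => decide (x.1 ∈ a_os))).map (·.1),
         (datos.filter (fun x => decide (x.1 ∈ a_os))).map (·.2)) :=
  pvA_foldl datos a_os

-- B computes the same two columns: gather = matching positions (sorted), reads = the columns
theorem pvB_eq (datos : List (Int × Int)) (a_os : List Int) :
    datos_especificos_alt datos a_os
      = ((datos.filter (fun x => decide (x.1 ∈ a_os))).map (·.1),
         (datos.filter (fun x => decide (x.1 ∈ a_os))).map (·.2)) := by
  unfold datos_especificos_alt
  simp only [pvGather_port, pvSorted_eq, pvRead_fst, pvRead_snd]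

-- ===== VERDICT (by name: the statement is the Claim_ definition above) =====
theorem datos_especificos_spec : Claim_equal_datos_especificos := by
  intro datos a_os _
  unfold Spec_datos_especificos
  rw [pvA_eq, pvB_eq]
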